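-- pv_equiv track=rewrite | github.com/amirrr/shortest-path-tree | test.py | possible_nodes
-- ===== SOURCE A (Python) =====
-- def possible_nodes(start_finish, visited):
--     """ look for possible node expantion based on visited nodes """
--     result = set()
--     for start in start_finish:
--         if start in visited:
--             if not start_finish[start] in visited:      # if destination is not visited
--                 result.add(start_finish[start])         # add it to the possible nodes
--         else:
--             result.add(start)       # if start is not visited its a possible node to visit
--     return result
-- ===== SOURCE B (Python) =====
-- def possible_nodes(start_finish, visited):
--     """Divide and conquer: split the key list in half, solve each half
--     independently, and combine the half-results with set union (no
--     accumulator threaded through a loop)."""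
--     vis = set(visited)
--
--     def solve(keys):
--         if not keys:
--             return set()
--         if len(keys) == 1:
--             s = keys[0]
--             c = start_finish[s] if s in vis else s
--             return set() if c in vis else {c}
--         mid = len(keys) // 2
--         return solve(keys[:mid]) | solve(keys[mid:])
--
--     return solve(list(start_finish))
-- ===== Notes on version B (the rewrite author's own statement) =====
-- stated objective: alternative
-- what changed: Replaces A's single accumulating loop (conditional .add into one growing result set) by a divide-and-conquer: the key list is split in half recursively, each half is solved independently, and the half-results are combined with set union.
import Mathlib
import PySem

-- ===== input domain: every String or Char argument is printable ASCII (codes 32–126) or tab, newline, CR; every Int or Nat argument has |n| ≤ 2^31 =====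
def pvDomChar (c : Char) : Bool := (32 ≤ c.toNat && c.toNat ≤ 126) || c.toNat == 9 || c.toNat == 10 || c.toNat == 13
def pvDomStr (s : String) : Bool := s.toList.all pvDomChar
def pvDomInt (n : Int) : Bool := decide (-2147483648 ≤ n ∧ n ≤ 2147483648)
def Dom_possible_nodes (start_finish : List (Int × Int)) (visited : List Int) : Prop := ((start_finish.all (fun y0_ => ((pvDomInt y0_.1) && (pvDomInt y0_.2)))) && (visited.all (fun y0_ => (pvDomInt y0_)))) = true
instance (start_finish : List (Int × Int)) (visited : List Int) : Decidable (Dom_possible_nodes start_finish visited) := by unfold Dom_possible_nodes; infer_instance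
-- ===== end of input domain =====

-- B replaces A's accumulating loop by an accumulator-free structural recursion (objective: alternative).

-- ===== PORT A =====
-- A: loop over the dict's keys maintaining a result set; visited start → add its
-- unvisited destination, unvisited start → add the start itself.
def possible_nodes (start_finish : List (Int × Int)) (visited : List Int) : List Int :=
  (PySem.Dict.ofList start_finish).keys.foldl (fun result start =>
    if start ∈ visited then
      (if !((PySem.Dict.ofList start_finish).getD start 0 ∈ visited) then
        PySem.Set.add result ((PySem.Dict.ofList start_finish).getD start 0)
      else result)
    else PySem.Set.add result start) PySem.Set.empty

-- ===== PORT B =====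
-- B's inner 'solve': divide and conquer on the key list — split in half
-- (keys[:mid] / keys[mid:] via PySem.List.slice), solve each half, combine with set union.
def pvSolve (d : PySem.Dict Int Int) (vis : List Int) : List Int → List Int
  | [] => PySem.Set.empty
  | [s] =>
      -- c = start_finish[s] if s in vis else s, inlined
      if (if s ∈ vis then d.getD s 0 else s) ∈ vis then PySem.Set.empty
      else PySem.Set.add PySem.Set.empty (if s ∈ vis then d.getD s 0 else s)
  | k1 :: k2 :: ks =>
      let mid : Nat := (k1 :: k2 :: ks).length / 2
      PySem.Set.union
        (pvSolve d vis (PySem.List.slice (k1 :: k2 :: ks) none (some (mid : Int))))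
        (pvSolve d vis (PySem.List.slice (k1 :: k2 :: ks) (some (mid : Int)) none))
  termination_by keys => keys.length
  decreasing_by
  · simp only [PySem.List.slice_to_natCast, List.length_take, List.length_cons]; omega
  · simp only [PySem.List.slice_from_natCast, List.length_drop, List.length_cons]; omega

-- B: solve(list(start_finish)) with vis = set(visited) (membership in vis = membership in visited)
def possible_nodes_alt (start_finish : List (Int × Int)) (visited : List Int) : List Int :=
  pvSolve (PySem.Dict.ofList start_finish) visited (PySem.Dict.ofList start_finish).keys

-- ===== PRECONDITION & SPEC =====
def Spec_possible_nodes (start_finish : List (Int × Int)) (visited : List Int) (out : List Int) : Prop := out = possible_nodes_alt start_finish visited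
instance (start_finish : List (Int × Int)) (visited : List Int) (out : List Int) : Decidable (Spec_possible_nodes start_finish visited out) := by unfold Spec_possible_nodes; infer_instance

-- ===== CLAIM (what is proved, stated in full; the proofs are below) =====
def Claim_equal_possible_nodes : Prop := ∀ (start_finish : List (Int × Int)) (visited : List Int), Dom_possible_nodes start_finish visited → Spec_possible_nodes start_finish visited (possible_nodes start_finish visited)

-- ===== LEMMAS AND PROOFS =====

-- first-occurrence dedup (proof-only normal form of a fold of Set.add)
def pvDedup : List Int → List Int
  | [] => []
  | c :: cs => c :: (pvDedup cs).filter (fun x => x ≠ c)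

-- a fold of Set.add equals pvDedup filtered by the accumulator
theorem pv_foldl_add (cs : List Int) : ∀ acc : List Int,
    List.foldl PySem.Set.add acc cs
      = acc ++ (pvDedup cs).filter (fun x => !(decide (x ∈ acc))) := by
  induction cs with
  | nil => intro acc; simp [pvDedup]
  | cons c cs ih =>
      intro acc
      simp only [List.foldl_cons, pvDedup, ih, List.filter_cons]
      by_cases hc : c ∈ acc
      · rw [PySem.Set.add_of_mem hc]
        rw [if_neg (by simp [hc])]
        congr 1
        rw [List.filter_filter]
        apply List.filter_congr
        intro x _
        by_cases hx : x = c
        · subst hx; simp [hc]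
        · simp [hx]
      · rw [PySem.Set.add_of_not_mem hc]
        rw [if_pos (by simp [hc])]
        rw [List.append_assoc, List.singleton_append]
        congr 2
        rw [List.filter_filter]
        apply List.filter_congr
        intro x _
        by_cases hx : x = c
        · subst hx; simp [hc]
        · simp [hx]

-- pvDedup output has no duplicates
theorem pv_nodup_dedup (cs : List Int) : (pvDedup cs).Nodup := by
  induction cs with
  | nil => exact List.nodup_nil
  | cons c cs ih =>
      refine List.Nodup.cons ?_ (List.Nodup.filter _ ih)
      intro h
      have := (List.mem_filter.mp h).2
      simp at this

-- pvDedup fixes duplicate-free lists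
theorem pv_dedup_of_nodup (l : List Int) (h : l.Nodup) : pvDedup l = l := by
  induction l with
  | nil => rfl
  | cons c cs ih =>
      have hc : c ∉ cs := (List.nodup_cons.mp h).1
      rw [pvDedup, ih (List.nodup_cons.mp h).2]
      congr 1
      apply List.filter_eq_self.mpr
      intro x hx
      simp only [decide_eq_true_eq]
      exact fun he => hc (he ▸ hx)

-- set(b) as a fold is pvDedup
theorem pv_foldl_nil_eq_dedup (b : List Int) :
    List.foldl PySem.Set.add [] b = pvDedup b := by
  rw [pv_foldl_add]; simp

-- set(a ++ b) = set(a) | set(b) (first-occurrence order both sides)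
theorem pv_ofList_append (a b : List Int) :
    PySem.Set.ofList (a ++ b) = PySem.Set.union (PySem.Set.ofList a) (PySem.Set.ofList b) := by
  have hu : PySem.Set.union (PySem.Set.ofList a) (PySem.Set.ofList b)
      = List.foldl PySem.Set.add (PySem.Set.ofList a) (PySem.Set.ofList b) := rfl
  rw [hu]
  simp only [PySem.Set.ofList_eq_foldl, List.foldl_append]
  rw [pv_foldl_add b, pv_foldl_add (List.foldl PySem.Set.add [] b),
    pv_foldl_nil_eq_dedup b, pv_dedup_of_nodup _ (pv_nodup_dedup b)]

-- A's branched loop body, reduced to Set.add over the filtered contribution list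
theorem pv_A_fold (d : PySem.Dict Int Int) (v : List Int) : ∀ (ks acc : List Int),
    List.foldl (fun result start =>
        if start ∈ v then
          (if !(d.getD start 0 ∈ v) then PySem.Set.add result (d.getD start 0) else result)
        else PySem.Set.add result start) acc ks
      = List.foldl PySem.Set.add acc
          ((ks.map (fun k => if k ∈ v then d.getD k 0 else k)).filter (fun c => !(decide (c ∈ v)))) := by
  intro ks
  induction ks with
  | nil => intro acc; rfl
  | cons k ks ih =>
      intro acc
      simp only [List.foldl_cons, List.map_cons, List.filter_cons]
      by_cases hk : k ∈ v
      · by_cases hd : d.getD k 0 ∈ v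
        · rw [if_pos hk, if_pos hk, if_neg (by simp [hd]), if_neg (by simp [hd])]
          exact ih acc
        · rw [if_pos hk, if_pos hk, if_pos (by simp [hd]), if_pos (by simp [hd])]
          rw [List.foldl_cons]
          exact ih _
      · rw [if_neg hk, if_neg hk, if_pos (by simp [hk])]
        rw [List.foldl_cons]
        exact ih _

-- B's divide and conquer computes set() of the filtered contribution list
theorem pv_solve_eq (d : PySem.Dict Int Int) (vis keys : List Int) :
    pvSolve d vis keys
      = PySem.Set.ofList ((keys.map (fun k => if k ∈ vis then d.getD k 0 else k)).filter (fun c => !(decide (c ∈ vis)))) := by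
  fun_induction pvSolve d vis keys with
  | case1 => rfl
  | case2 s hc =>
      rw [dite_eq_ite] at hc
      simp [hc, PySem.Set.empty]
  | case3 s hc =>
      rw [dite_eq_ite] at hc
      simp [hc, PySem.Set.ofList_eq_foldl, PySem.Set.add, PySem.Set.empty, PySem.Set.contains]
  | case4 k1 k2 ks mid ih1 ih2 =>
      rw [ih1, ih2]
      rw [PySem.List.slice_to_natCast, PySem.List.slice_from_natCast]
      rw [← pv_ofList_append, ← List.filter_append, ← List.map_append, List.take_append_drop]

-- ===== VERDICT (by name: the statement is the Claim_ definition above) =====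
theorem possible_nodes_spec : Claim_equal_possible_nodes := by
  intro start_finish visited _
  unfold Spec_possible_nodes possible_nodes possible_nodes_alt
  rw [pv_A_fold, pv_solve_eq, PySem.Set.ofList_eq_foldl]
  rfl
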